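-- pv_equiv track=rewrite | github.com/JJassonn69/PLFM_RADAR | 4_Schematics and Boards Layout/4_6_Schematics/MainBoard/scripts/fpga_swap.py | find_symbol_blocks_by_uuid
-- ===== SOURCE A (Python) =====
-- def find_sexp_block(lines, start_idx):
--     """Find the complete S-expression block starting at start_idx.
--     Returns (start, end) indices (inclusive) of lines forming the block."""
--     depth = 0
--     end = start_idx
--     for i in range(start_idx, len(lines)):
--         depth += lines[i].count('(') - lines[i].count(')')
--         if depth <= 0:
--             end = i
--             break
--     return (start_idx, end)
--
-- def find_symbol_blocks_by_uuid(lines, uuids):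
--     """Find all symbol blocks that contain any of the given UUIDs.
--     Returns list of (start, end) tuples."""
--     blocks = []
--     for i, line in enumerate(lines):
--         # Look for lines containing our UUIDs
--         for uid in uuids:
--             if uid in line and '(uuid' in line:
--                 # Walk backwards to find the start of the enclosing (symbol block
--                 # The symbol block starts with a line containing '(symbol'
--                 start = i
--                 depth = 0
--                 for j in range(i, -1, -1):
--                     if '(symbol' in lines[j] and '(lib_id' not in lines[j]:
--                         # Check if this is a top-level symbol (not a sub-symbol)
--                         # by checking indentation
--                         stripped = lines[j].lstrip()
--                         if stripped.startswith('(symbol'):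
--                             start = j
--                             break
--                     # Also check lib_id on next line
--                     if '(symbol' in lines[j]:
--                         start = j
--                         break
--
--                 # Now find the end of this block
--                 s, e = find_sexp_block(lines, start)
--                 blocks.append((s, e))
--                 break
--     return blocks
-- ===== SOURCE B (Python) =====
-- def _block_at(lines, start):
--     # End of the S-expression block opening at `start`: first line (from start)
--     # where the running paren depth drops to <= 0; (start, start) if none.
--     depth = 0
--     for i in range(start, len(lines)):
--         depth += lines[i].count('(') - lines[i].count(')')
--         if depth <= 0:
--             return (start, i)
--     return (start, start)
--
-- def find_symbol_blocks_by_uuid(lines, uuids):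
--     """Find all symbol blocks that contain any of the given UUIDs.
--     Returns list of (start, end) tuples."""
--     blocks = []
--     last_symbol = None  # index of the most recent line containing '(symbol'
--     for i, line in enumerate(lines):
--         if '(symbol' in line:
--             last_symbol = i
--         if '(uuid' in line and any(uid in line for uid in uuids):
--             start = last_symbol if last_symbol is not None else i
--             blocks.append(_block_at(lines, start))
--     return blocks
-- ===== Notes on version B (the rewrite author's own statement) =====
-- stated objective: alternative
-- what changed: The per-match backward scan that finds the enclosing '(symbol' line is replaced by a single forward pass that maintains the index of the most recent '(symbol' line, using it (or the current line) as the block start.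
import Mathlib
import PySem

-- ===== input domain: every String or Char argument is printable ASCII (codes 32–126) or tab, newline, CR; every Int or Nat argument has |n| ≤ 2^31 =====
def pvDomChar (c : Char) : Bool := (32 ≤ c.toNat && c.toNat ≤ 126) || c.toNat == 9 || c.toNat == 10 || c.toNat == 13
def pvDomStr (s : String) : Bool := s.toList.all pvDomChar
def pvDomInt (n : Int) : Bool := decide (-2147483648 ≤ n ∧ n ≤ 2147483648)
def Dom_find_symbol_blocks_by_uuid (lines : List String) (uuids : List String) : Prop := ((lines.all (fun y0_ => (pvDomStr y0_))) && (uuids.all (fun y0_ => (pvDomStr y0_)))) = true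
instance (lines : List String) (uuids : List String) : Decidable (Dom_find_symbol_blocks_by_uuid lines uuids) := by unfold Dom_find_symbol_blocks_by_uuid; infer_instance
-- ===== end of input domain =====

-- B replaces A's per-match backward scan for the enclosing '(symbol' line by a single
-- forward pass maintaining the index of the most recent such line (objective: alternative).


-- ===== PORT A =====
-- depth delta of one line: line.count('(') - line.count(')')
def pvDelta (line : String) : Int :=
  (PySem.Str.count line "(" : Int) - (PySem.Str.count line ")" : Int)

-- the for-loop of find_sexp_block with its break: first i ≥ start where depth ≤ 0
def pvSexpEnd (rest : List String) (depth : Int) (idx : Nat) : Option Nat :=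
  match rest with
  | [] => none
  | s :: t =>
      let d := depth + pvDelta s
      if d ≤ 0 then some idx else pvSexpEnd t d (idx + 1)

def find_sexp_block (lines : List String) (startIdx : Nat) : Nat × Nat :=
  (startIdx, (pvSexpEnd (lines.drop startIdx) 0 startIdx).getD startIdx)

-- the backward scan 'for j in range(i, -1, -1)' with its two breaks
def pvABack (lines : List String) (j : Nat) : Option Nat :=
  let line := lines.getD j ""
  if PySem.Str.isIn "(symbol" line && !PySem.Str.isIn "(lib_id" line
       && PySem.Str.startswith (PySem.Str.lstrip line) "(symbol" then
    some j
  else if PySem.Str.isIn "(symbol" line then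
    some j
  else
    match j with
    | 0 => none
    | k + 1 => pvABack lines k

def pvAGo (lines uuids : List String) (i : Nat) (rest : List String) : List (Int × Int) :=
  match rest with
  | [] => []
  | line :: t =>
      (if uuids.any (fun uid => PySem.Str.isIn uid line && PySem.Str.isIn "(uuid" line) then
        let start := (pvABack lines i).getD i
        let p := find_sexp_block lines start
        [((p.1 : Int), (p.2 : Int))]
      else []) ++ pvAGo lines uuids (i + 1) t

def find_symbol_blocks_by_uuid (lines : List String) (uuids : List String) : List (Int × Int) :=
  pvAGo lines uuids 0 lines

-- ===== PORT B =====
-- _block_at: returns (start, i) at the first depth drop, (start, start) if the scan runs out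
def pvBWalk (rest : List String) (depth : Int) (idx start : Nat) : Nat × Nat :=
  match rest with
  | [] => (start, start)
  | s :: t =>
      let d := depth + pvDelta s
      if d ≤ 0 then (start, idx) else pvBWalk t d (idx + 1) start

def pvBlockAt (lines : List String) (start : Nat) : Nat × Nat :=
  pvBWalk (lines.drop start) 0 start start

-- single forward pass carrying last_symbol
def pvBGo (lines uuids : List String) (i : Nat) (rest : List String) (lastSym : Option Nat) :
    List (Int × Int) :=
  match rest with
  | [] => []
  | line :: t =>
      let lastSym' := if PySem.Str.isIn "(symbol" line then some i else lastSym
      (if PySem.Str.isIn "(uuid" line && uuids.any (fun uid => PySem.Str.isIn uid line) then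
        let p := pvBlockAt lines (lastSym'.getD i)
        [((p.1 : Int), (p.2 : Int))]
      else []) ++ pvBGo lines uuids (i + 1) t lastSym'

def find_symbol_blocks_by_uuid_alt (lines : List String) (uuids : List String) : List (Int × Int) :=
  pvBGo lines uuids 0 lines none

-- ===== PRECONDITION & SPEC =====
def Spec_find_symbol_blocks_by_uuid (lines : List String) (uuids : List String) (out : List (Int × Int)) : Prop := out = find_symbol_blocks_by_uuid_alt lines uuids
instance (lines : List String) (uuids : List String) (out : List (Int × Int)) : Decidable (Spec_find_symbol_blocks_by_uuid lines uuids out) := by unfold Spec_find_symbol_blocks_by_uuid; infer_instance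

-- ===== CLAIM (what is proved, stated in full; the proofs are below) =====
def Claim_equal_find_symbol_blocks_by_uuid : Prop := ∀ (lines : List String) (uuids : List String), Dom_find_symbol_blocks_by_uuid lines uuids → Spec_find_symbol_blocks_by_uuid lines uuids (find_symbol_blocks_by_uuid lines uuids)

-- ===== LEMMAS AND PROOFS =====

-- the value last_symbol holds when the forward pass reaches index i
def pvPrevSym (lines : List String) (i : Nat) : Option Nat :=
  match i with
  | 0 => none
  | k + 1 => pvABack lines k

-- both breaks of the backward scan fire exactly on '(symbol' ∈ line
theorem pvABack_eq (lines : List String) (j : Nat) :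
    pvABack lines j =
      if PySem.Str.isIn "(symbol" (lines.getD j "") then some j else pvPrevSym lines j := by
  by_cases h : PySem.Str.isIn "(symbol" (lines.getD j "") = true
  · rw [pvABack.eq_def]
    simp only [h, Bool.true_and, if_pos]
    split <;> simp
  · rw [pvABack.eq_def]
    simp only [Bool.not_eq_true] at h
    simp only [h, Bool.false_and, Bool.false_eq_true, not_false_iff, if_neg]
    cases j <;> rfl

-- B's block walk computes A's find_sexp_block
theorem pvBWalk_eq (rest : List String) (depth : Int) (idx start : Nat) :
    pvBWalk rest depth idx start = (start, (pvSexpEnd rest depth idx).getD start) := by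
  induction rest generalizing depth idx with
  | nil => rfl
  | cons s t ih =>
      simp only [pvBWalk, pvSexpEnd]
      split <;> simp [ih]

theorem pvBlockAt_eq (lines : List String) (start : Nat) :
    pvBlockAt lines start = find_sexp_block lines start := by
  simp [pvBlockAt, find_sexp_block, pvBWalk_eq]

-- the two match conditions are the same boolean
theorem pvCond_eq (uuids : List String) (line : String) :
    (uuids.any fun uid => PySem.Str.isIn uid line && PySem.Str.isIn "(uuid" line)
      = (PySem.Str.isIn "(uuid" line && uuids.any fun uid => PySem.Str.isIn uid line) := by
  cases h : PySem.Str.isIn "(uuid" line <;> simp [List.any_eq]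

theorem pvGo_eq (lines uuids : List String) :
    ∀ (i : Nat) (rest : List String), rest = lines.drop i →
      pvAGo lines uuids i rest = pvBGo lines uuids i rest (pvPrevSym lines i) := by
  intro i rest
  induction rest generalizing i with
  | nil => intro _; rfl
  | cons line t ih =>
      intro hdrop
      have h0 : (lines.drop i)[0]? = some line := by rw [← hdrop]; rfl
      have hget : lines[i]? = some line := by
        rw [List.getElem?_drop] at h0; simpa using h0
      have hline : lines.getD i "" = line := by
        simp [List.getD, hget]
      have hlast : (if PySem.Str.isIn "(symbol" line then some i else pvPrevSym lines i)
          = pvABack lines i := by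
        rw [pvABack_eq, hline]
      have ht : t = lines.drop (i + 1) := by
        rw [← List.drop_drop, ← hdrop]; rfl
      have hsucc : pvPrevSym lines (i + 1) = pvABack lines i := rfl
      simp only [pvAGo, pvBGo, pvCond_eq, ih (i + 1) ht, pvBlockAt_eq, hsucc, ← hlast]

-- ===== VERDICT (by name: the statement is the Claim_ definition above) =====
theorem find_symbol_blocks_by_uuid_spec : Claim_equal_find_symbol_blocks_by_uuid := by
  intro lines uuids _
  unfold Spec_find_symbol_blocks_by_uuid find_symbol_blocks_by_uuid find_symbol_blocks_by_uuid_alt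
  exact pvGo_eq lines uuids 0 lines rfl
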